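-- pv_equiv track=rewrite | github.com/Mmajee/School-Projects | PythonA8/functions.py | two_element_subset
-- ===== SOURCE A (Python) =====
-- def two_element_subset(string):
--     """
--     -------------------------------------------------------
--     Creates a list of all two-element subsets of the characters
--     of a string.
--     Use: subsets = two_element_subset(string)
--     -------------------------------------------------------
--     Parameters:
--         string - a string (str)
--     Returns:
--         subsets - a list of two element subsets of s (list of str)
--     -------------------------------------------------------
--     """
--
--     subsets = []
--     string2 = string[0]
--     count = 1
--     count2 = 1
--     count3 = 0
--
--     while count < (len(string)):
--         string2 += string[count]
--         subsets.append(string2)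
--
--         if count == (len(string) - 1):
--             count = count2
--             count2 += 1
--             count3 += 1
--
--         string2 = string[count3]
--
--         count += 1
--
--     return subsets
-- ===== SOURCE B (Python) =====
-- def two_element_subset(string):
--     head = string[0]
--     tail = string[1:]
--     if not tail:
--         return []
--     return [head + c for c in tail] + two_element_subset(tail)
-- ===== Notes on version B (the rewrite author's own statement) =====
-- stated objective: simpler
-- what changed: Replaces the three-counter rewinding while loop by a recursive head/tail decomposition: pair the head with every later character, then recurse on the tail.
import Mathlib
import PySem

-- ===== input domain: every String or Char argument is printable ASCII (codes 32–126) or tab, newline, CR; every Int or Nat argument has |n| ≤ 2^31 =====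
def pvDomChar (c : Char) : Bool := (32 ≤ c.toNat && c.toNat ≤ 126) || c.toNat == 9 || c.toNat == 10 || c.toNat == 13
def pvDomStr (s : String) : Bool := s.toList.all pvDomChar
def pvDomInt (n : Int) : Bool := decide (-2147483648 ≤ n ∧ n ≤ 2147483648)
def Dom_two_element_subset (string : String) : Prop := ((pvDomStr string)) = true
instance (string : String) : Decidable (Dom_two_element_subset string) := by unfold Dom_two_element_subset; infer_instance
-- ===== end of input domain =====

-- B replaces A's three-counter rewinding while loop by a recursive head/tail decomposition (simpler; same O(n^2) cost).


-- ===== PORT A =====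
-- A's while loop, fueled (fuel n*n+1 strictly exceeds the loop's n(n-1)/2 iterations).
-- Counters stay nonnegative throughout the loop, so Nat counters and `getD`-indexing are
-- exact on every input admitted by Pre_ (the nonempty strings; on "" Python raises at string[0]).
def twoLoop (s : List Char) (fuel : Nat) (string2 : List Char)
    (count count2 count3 : Nat) (subsets : List String) : List String :=
  match fuel with
  | 0 => subsets
  | Nat.succ fuel =>
    if count < s.length then
      -- string2 += string[count]; subsets.append(string2)
      let string2' := string2 ++ [s.getD count ' ']
      let subsets' := subsets ++ [String.mk string2']
      if count = s.length - 1 then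
        -- count = count2; count2 += 1; count3 += 1; string2 = string[count3]; count += 1
        twoLoop s fuel [s.getD (count3 + 1) ' '] (count2 + 1) (count2 + 1) (count3 + 1) subsets'
      else
        -- string2 = string[count3]; count += 1
        twoLoop s fuel [s.getD count3 ' '] (count + 1) count2 count3 subsets'
    else subsets

def two_element_subset (string : String) : List String :=
  let s := string.toList
  -- string2 = string[0] (IndexError on "" — excluded by Pre_); count = 1; count2 = 1; count3 = 0
  twoLoop s (s.length * s.length + 1) [s.getD 0 ' '] 1 1 0 []

-- ===== PORT B =====
-- head = string[0]; tail = string[1:]; if not tail: return [];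
-- return [head + c for c in tail] + two_element_subset(tail)
-- (On "" Python B raises IndexError at string[0]; that input is excluded by Pre_.)
def altRec : List Char → List String
  | [] => []
  | h :: t => if t = [] then [] else (t.map (fun c => String.mk [h, c])) ++ altRec t

def two_element_subset_alt (string : String) : List String :=
  altRec string.toList

-- ===== PRECONDITION & SPEC =====
-- Pre_ excludes only the empty string, on which both A and B raise IndexError at string[0].
def Pre_two_element_subset (string : String) : Prop := string ≠ ""
instance (string : String) : Decidable (Pre_two_element_subset string) := by unfold Pre_two_element_subset; infer_instance
def pvWitness_two_element_subset : String := "abc"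

def Spec_two_element_subset (string : String) (out : List String) : Prop := out = two_element_subset_alt string
instance (string : String) (out : List String) : Decidable (Spec_two_element_subset string out) := by unfold Spec_two_element_subset; infer_instance

-- ===== CLAIM (what is proved, stated in full; the proofs are below) =====
def Claim_equal_two_element_subset : Prop := ∀ (string : String), Dom_two_element_subset string → Pre_two_element_subset string → Spec_two_element_subset string (two_element_subset string)

-- ===== LEMMAS AND PROOFS =====

-- Loop invariant: in "phase j" (count3 = j, count2 = j + 1, string2 = [s[j]]), the loop
-- appends the pairs (j, i) for i = count … n-1, then behaves like altRec on s.drop (j+1).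
lemma twoLoop_eq (s : List Char) :
    ∀ (fuel j count : Nat) (subsets : List String),
      j + 1 ≤ count → count ≤ s.length → j + 1 ≤ s.length →
      (count = s.length → j + 1 = s.length) →
      (s.length - count) + (s.length - 1 - j) * s.length < fuel →
      twoLoop s fuel [s.getD j ' '] count (j + 1) j subsets
        = subsets ++ (s.drop count).map (fun c => String.mk [s.getD j ' ', c])
            ++ altRec (s.drop (j + 1)) := by
  intro fuel
  induction fuel with
  | zero => intro j count subsets _ _ _ _ hf; omega
  | succ fuel ih =>
    intro j count subsets hjc hcn hjn hend hf
    by_cases hc : count < s.length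
    · rw [twoLoop]
      simp only [hc, if_true]
      have hdropc : s.drop count = s[count] :: s.drop (count + 1) :=
        List.drop_eq_getElem_cons hc
      have hgc : s.getD count ' ' = s[count] := List.getD_eq_getElem s ' ' hc
      by_cases hlast : count = s.length - 1
      · subst hlast
        simp only [if_true]
        have hjn2 : j + 2 ≤ s.length := by omega
        have hdj : s.drop (j + 1) = s[j+1] :: s.drop (j + 2) :=
          List.drop_eq_getElem_cons (by omega)
        have hgj : s.getD (j + 1) ' ' = s[j+1] := List.getD_eq_getElem s ' ' (by omega)
        rw [ih (j + 1) (j + 2) _ (by omega) (by omega) (by omega) (by omega)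
          (by
            have h1 : s.length - 1 - j = (s.length - 2 - j) + 1 := by omega
            have h2 : s.length - 1 - (j + 1) = s.length - 2 - j := by omega
            rw [h1, Nat.succ_mul] at hf
            rw [h2]
            omega)]
        have hdn : s.drop (s.length - 1 + 1) = [] := List.drop_eq_nil_of_le (by omega)
        rw [hdropc, hdn, hdj]
        have hge1 : s[s.length - 1]? = some s[s.length - 1] := List.getElem?_eq_getElem hc
        have hge2 : s[j + 1]? = some s[j+1] := List.getElem?_eq_getElem (by omega)
        by_cases ht : s.drop (j + 2) = []
        · simp [altRec, ht, hge1, hge2]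
        · simp [altRec, ht, hge1, hge2]
      · simp only [hlast, if_false]
        rw [ih j (count + 1) _ (by omega) (by omega) (by omega) (by omega)
          (by omega)]
        rw [hdropc]
        simp only [List.map_cons, hgc, List.append_assoc, List.cons_append,
          List.nil_append]
    · have hcn' : count = s.length := by omega
      rw [twoLoop]
      simp only [hc, if_false]
      have h1 : s.drop count = [] := List.drop_eq_nil_of_le (by omega)
      have h2 : s.drop (j + 1) = [] := List.drop_eq_nil_of_le (by omega)
      simp [h1, h2, altRec]

-- ===== VERDICT (by name: the statement is the Claim_ definition above) =====
theorem two_element_subset_spec : Claim_equal_two_element_subset := by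
  intro string _ hpre
  unfold Spec_two_element_subset two_element_subset two_element_subset_alt
  have hs : string.toList ≠ [] := by
    intro h
    apply hpre
    cases string with
    | _ d => simp_all
  cases hsl : string.toList with
  | nil => exact absurd hsl hs
  | cons h t =>
    have hn : (h :: t).length = t.length + 1 := by simp
    rw [twoLoop_eq (h :: t) _ 0 1 [] (by omega) (by simp) (by simp)
      (by intro hh; omega)
      (by
        simp only [hn]
        have h0 : (t.length + 1 - 1 - 0) * (t.length + 1) = t.length * (t.length + 1) := by
          norm_num
        rw [h0]
        have hx' : (t.length + 1) * (t.length + 1)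
            = t.length * (t.length + 1) + (t.length + 1) := by
          rw [Nat.succ_mul]
        omega)]
    cases t with
    | nil => simp [altRec]
    | cons h2 t2 =>
      rw [altRec, if_neg (List.cons_ne_nil h2 t2)]
      have hd : (h :: h2 :: t2).drop 1 = h2 :: t2 := by simp
      simp [hd]
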